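-- pv_equiv track=rewrite | github.com/Recovic/JapaneseLoanwords | combine.py | split_en
-- ===== SOURCE A (Python) =====
-- def split_en(e, z):
-- 	eu = []
-- 	i = 0
-- 	#start[0] = 0
-- 	cur = e[0]
-- 	for j in range(len(z)):
-- 		if z[j] == '1':
-- 			eu.append(cur)
-- 			cur = e[j + 1]
-- 			#end[i] = j
-- 			#start[i + 1] = j + 1
-- 			i += 1
-- 		else:
-- 			cur += e[j + 1]
-- 	if cur:
-- 		eu.append(cur)
-- 		#end[i] = len(e) - 1
-- 	return eu
-- ===== SOURCE B (Python) =====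
-- def split_en(e, z):
--     breaks = [j for j in range(len(z)) if z[j] == '1']
--     starts = [0] + [b + 1 for b in breaks]
--     ends = breaks + [len(z)]
--     groups = []
--     for s, t in zip(starts, ends):
--         acc = e[s]
--         for k in range(s + 1, t + 1):
--             acc += e[k]
--         groups.append(acc)
--     return groups
-- ===== Notes on version B (the rewrite author's own statement) =====
-- stated objective: alternative
-- what changed: Instead of A's single loop that threads one growing accumulator through the marker scan and filters the final group by truthiness, B first computes the break positions of z, derives each group's start/end index range, and then builds every group independently from its range.
import Mathlib
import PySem

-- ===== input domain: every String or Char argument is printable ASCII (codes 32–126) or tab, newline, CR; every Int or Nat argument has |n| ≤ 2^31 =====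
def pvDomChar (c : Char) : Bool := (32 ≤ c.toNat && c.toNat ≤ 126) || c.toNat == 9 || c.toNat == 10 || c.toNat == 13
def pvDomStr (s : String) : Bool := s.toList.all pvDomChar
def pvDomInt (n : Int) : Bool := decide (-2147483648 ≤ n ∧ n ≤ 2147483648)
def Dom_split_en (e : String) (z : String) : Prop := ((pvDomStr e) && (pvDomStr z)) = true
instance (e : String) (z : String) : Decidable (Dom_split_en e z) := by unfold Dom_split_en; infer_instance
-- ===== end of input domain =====

-- B replaces A's single accumulator-threading scan by a two-phase decomposition: first the
-- break positions of z, then each group built independently from its index range (objective: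
-- alternative; same return value on Pre_).

-- ===== PORT A =====
def split_en (e : String) (z : String) : List String :=
  let el := e.toList
  let cur0 : List Char := [PySem.List.pyGetD el 0 ' ']
  let r := (PySem.List.pyRange 0 (PySem.Str.len z) 1).foldl
    (fun (st : List (List Char) × List Char) (j : Int) =>
      if PySem.List.pyGetD z.toList j ' ' = '1' then
        (st.1 ++ [st.2], [PySem.List.pyGetD el (j + 1) ' '])
      else
        (st.1, st.2 ++ [PySem.List.pyGetD el (j + 1) ' ']))
    ([], cur0)
  (if r.2 ≠ [] then r.1 ++ [r.2] else r.1).map (fun cs => String.ofList cs)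

-- ===== PORT B =====
def split_en_alt (e : String) (z : String) : List String :=
  let breaks := (PySem.List.pyRange 0 (PySem.Str.len z) 1).filter
    (fun j => PySem.List.pyGetD z.toList j ' ' = '1')
  let starts := (0 : Int) :: breaks.map (fun b => b + 1)
  let ends := breaks ++ [PySem.Str.len z]
  (starts.zip ends).map (fun p =>
    String.ofList ((PySem.List.pyRange (p.1 + 1) (p.2 + 1) 1).foldl
      (fun acc k => acc ++ [PySem.List.pyGetD e.toList k ' '])
      [PySem.List.pyGetD e.toList p.1 ' ']))

-- ===== PRECONDITION & SPEC =====
-- Pre_ excludes exactly the inputs on which A raises IndexError (e[0] or e[j+1] out of range).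
def Pre_split_en (e : String) (z : String) : Prop := z.toList.length < e.toList.length
instance (e : String) (z : String) : Decidable (Pre_split_en e z) := by
  unfold Pre_split_en; infer_instance
def pvWitness_split_en : String × String := ("abc", "01")

def Spec_split_en (e : String) (z : String) (out : List String) : Prop := out = split_en_alt e z
instance (e : String) (z : String) (out : List String) : Decidable (Spec_split_en e z out) := by
  unfold Spec_split_en; infer_instance

-- ===== CLAIM (what is proved, stated in full; the proofs are below) =====
def Claim_equal_split_en : Prop :=
  ∀ (e : String) (z : String), Dom_split_en e z → Pre_split_en e z →
    Spec_split_en e z (split_en e z)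

-- ===== LEMMAS AND PROOFS =====

/-- Consecutive pairs of `c :: cs`. -/
def pairsFrom (c : Int) : List Int → List (Int × Int)
  | [] => []
  | d :: cs => (c, d) :: pairsFrom d cs

/-- The final `if cur: eu.append(cur)` of A. -/
def finishA (r : List (List Char) × List Char) : List (List Char) :=
  if r.2 ≠ [] then r.1 ++ [r.2] else r.1

/-- A's loop body. -/
def stepA (e z : String) (st : List (List Char) × List Char) (j : Int) :
    List (List Char) × List Char :=
  if PySem.List.pyGetD z.toList j ' ' = '1' then
    (st.1 ++ [st.2], [PySem.List.pyGetD e.toList (j + 1) ' '])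
  else
    (st.1, st.2 ++ [PySem.List.pyGetD e.toList (j + 1) ' '])

/-- The cut positions produced by B starting from index `k` of `z`, plus the final cut. -/
def cutsFrom (z : String) (k : Int) : List Int :=
  ((PySem.List.pyRange k (PySem.Str.len z) 1).filterMap
    (fun j => if PySem.List.pyGetD z.toList j ' ' = '1' then some (j + 1) else none))
    ++ [PySem.Str.len z + 1]

theorem main_invariant (e z : String) (hp : z.toList.length < e.toList.length) :
    ∀ (m k c : Nat) (eu : List (List Char)),
      k + m = z.toList.length → c ≤ k →
      finishA ((PySem.List.pyRange (k : Int) (PySem.Str.len z) 1).foldl (stepA e z)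
          (eu, (e.toList.drop c).take (k + 1 - c)))
      = eu ++ (pairsFrom (c : Int) (cutsFrom z (k : Int))).map
          (fun p => PySem.List.slice e.toList (some p.1) (some p.2)) := by
  intro m
  induction m with
  | zero =>
    intro k c eu hk hc
    have hlen : PySem.Str.len z = (k : Int) := by rw [PySem.Str.len_eq]; omega
    have hcast : ((k : Int) + 1) = (((k + 1 : Nat)) : Int) := by push_cast; ring
    have hsl : PySem.List.slice e.toList (some (c : Int)) (some ((k : Int) + 1))
        = (e.toList.drop c).take (k + 1 - c) := by
      rw [hcast, PySem.List.slice_natCast]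
    have hne : (e.toList.drop c).take (k + 1 - c) ≠ [] := by
      have hl : ((e.toList.drop c).take (k + 1 - c)).length = k + 1 - c := by
        rw [List.length_take, List.length_drop]; omega
      intro h; rw [h] at hl; simp at hl; omega
    have hcuts0 : cutsFrom z (k : Int) = [(k : Int) + 1] := by
      unfold cutsFrom
      rw [hlen, PySem.List.pyRange_one_eq_nil (le_refl _)]
      rfl
    rw [hlen, PySem.List.pyRange_one_eq_nil (le_refl _), List.foldl_nil, hcuts0]
    simp [finishA, hne, pairsFrom, hsl]
  | succ m ih =>
    intro k c eu hk hc
    have hkz : (k : Int) < PySem.Str.len z := by rw [PySem.Str.len_eq]; omega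
    have hk1 : k < z.toList.length := by omega
    have hke : k + 1 < e.toList.length := by omega
    have hcast : ((k : Int) + 1) = (((k + 1 : Nat)) : Int) := by push_cast; ring
    have hz : PySem.List.pyGetD z.toList (k : Int) ' ' = z.toList[k] := by
      rw [PySem.List.pyGetD_natCast]
      simp [List.getD_eq_getElem?_getD, List.getElem?_eq_getElem hk1]
    have he : PySem.List.pyGetD e.toList ((k : Int) + 1) ' ' = e.toList[k + 1] := by
      rw [hcast, PySem.List.pyGetD_natCast]
      simp [List.getD_eq_getElem?_getD, List.getElem?_eq_getElem hke]
    have hsl : PySem.List.slice e.toList (some (c : Int)) (some ((k : Int) + 1))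
        = (e.toList.drop c).take (k + 1 - c) := by
      rw [hcast, PySem.List.slice_natCast]
    have hdrop : e.toList.drop (k + 1) = e.toList[k + 1] :: e.toList.drop (k + 2) :=
      List.drop_eq_getElem_cons hke
    rw [PySem.List.pyRange_one_cons hkz, List.foldl_cons]
    by_cases h1 : z.toList[k] = '1'
    · -- marker: close the current group, start a new one at e[k+1]
      have hstep : stepA e z (eu, (e.toList.drop c).take (k + 1 - c)) (k : Int)
          = (eu ++ [(e.toList.drop c).take (k + 1 - c)],
             (e.toList.drop (k + 1)).take ((k + 1) + 1 - (k + 1))) := by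
        unfold stepA
        rw [hz, if_pos h1, he]
        have h0 : (k + 1) + 1 - (k + 1) = 1 := by omega
        rw [h0, hdrop, List.take_succ_cons, List.take_zero]
      have hcuts : cutsFrom z (k : Int) = ((k : Int) + 1) :: cutsFrom z ((k : Int) + 1) := by
        unfold cutsFrom
        rw [PySem.List.pyRange_one_cons hkz, List.filterMap_cons, hz, if_pos h1]
        rfl
      have hih := ih (k + 1) (k + 1) (eu ++ [(e.toList.drop c).take (k + 1 - c)])
        (by omega) (le_refl _)
      rw [show (((k + 1 : Nat)) : Int) = (k : Int) + 1 from by push_cast; ring] at hih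
      rw [hstep, hih, hcuts]
      simp [pairsFrom, hsl]
    · -- no marker: extend the current group with e[k+1]
      have hstep : stepA e z (eu, (e.toList.drop c).take (k + 1 - c)) (k : Int)
          = (eu, (e.toList.drop c).take ((k + 1) + 1 - c)) := by
        unfold stepA
        rw [hz, if_neg h1, he]
        have h2 : (k + 1) + 1 - c = (k + 1 - c) + 1 := by omega
        rw [h2, List.take_add_one]
        have h3 : (e.toList.drop c)[k + 1 - c]? = some e.toList[k + 1] := by
          rw [List.getElem?_drop,
            List.getElem?_eq_getElem (by omega : c + (k + 1 - c) < e.toList.length)]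
          congr 1
          congr 1
          omega
        rw [h3]
        rfl
      have hcuts : cutsFrom z (k : Int) = cutsFrom z ((k : Int) + 1) := by
        unfold cutsFrom
        rw [PySem.List.pyRange_one_cons hkz, List.filterMap_cons, hz, if_neg h1]
      have hih := ih (k + 1) c eu (by omega) (by omega)
      rw [show (((k + 1 : Nat)) : Int) = (k : Int) + 1 from by push_cast; ring] at hih
      rw [hstep, hih, hcuts]

theorem filterMap_if_eq_map_filter (l : List Int) (p : Int → Prop) [DecidablePred p]
    (f : Int → Int) :
    l.filterMap (fun j => if p j then some (f j) else none)
      = (l.filter (fun j => p j)).map f := by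
  induction l with
  | nil => rfl
  | cons a l ih => by_cases h : p a <;> simp [h, ih]

theorem pairs_shift : ∀ (F : List Int) (c n : Int),
    (c :: F.map (fun b => b + 1)).zip (F ++ [n])
      = (pairsFrom c (F.map (fun b => b + 1) ++ [n + 1])).map (fun p => (p.1, p.2 - 1)) := by
  intro F
  induction F with
  | nil => intro c n; simp [pairsFrom]
  | cons b F ih =>
    intro c n
    simp only [List.map_cons, List.cons_append, List.zip_cons_cons, pairsFrom, ih (b + 1) n]
    simp

theorem pairs_bound : ∀ (L : List Int) (c M : Int), (c :: L).Pairwise (· < ·) →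
    (∀ x ∈ L, x ≤ M) → ∀ p ∈ pairsFrom c L, c ≤ p.1 ∧ p.1 < p.2 ∧ p.2 ≤ M := by
  intro L
  induction L with
  | nil => intro c M _ _ p hp; simp [pairsFrom] at hp
  | cons d L ih =>
    intro c M hpw hM p hp
    have hcd : c < d := (List.pairwise_cons.1 hpw).1 d (by simp)
    simp only [pairsFrom, List.mem_cons] at hp
    rcases hp with rfl | hp
    · exact ⟨le_refl c, hcd, hM d (by simp)⟩
    · have h2 := ih d M (List.pairwise_cons.1 hpw).2 (fun x hx => hM x (by simp [hx])) p hp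
      exact ⟨le_trans (le_of_lt hcd) h2.1, h2.2.1, h2.2.2⟩

theorem seg_aux (L : List Char) : ∀ (m s i : Nat), s ≤ i → i + m < L.length →
    (PySem.List.pyRange ((i : Int) + 1) ((i : Int) + 1 + (m : Int)) 1).foldl
      (fun acc k => acc ++ [PySem.List.pyGetD L k ' ']) ((L.drop s).take (i + 1 - s))
    = (L.drop s).take (i + m + 1 - s) := by
  intro m
  induction m with
  | zero =>
    intro s i hs hi
    rw [show ((i : Int) + 1 + ((0 : Nat) : Int)) = (i : Int) + 1 from by push_cast; ring,
      PySem.List.pyRange_one_eq_nil (le_refl _), List.foldl_nil]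
  | succ m ih =>
    intro s i hs hi
    have h1 : (i : Int) + 1 < (i : Int) + 1 + ((m + 1 : Nat) : Int) := by push_cast; omega
    have hi1 : i + 1 < L.length := by omega
    rw [PySem.List.pyRange_one_cons h1]
    simp only [List.foldl_cons]
    have he : PySem.List.pyGetD L ((i : Int) + 1) ' ' = L[i + 1] := by
      rw [show ((i : Int) + 1) = (((i + 1 : Nat)) : Int) from by push_cast; ring,
        PySem.List.pyGetD_natCast]
      simp [List.getD_eq_getElem?_getD, List.getElem?_eq_getElem hi1]
    have hext : (L.drop s).take (i + 1 - s) ++ [PySem.List.pyGetD L ((i : Int) + 1) ' ']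
        = (L.drop s).take ((i + 1) + 1 - s) := by
      rw [he, show (i + 1) + 1 - s = (i + 1 - s) + 1 from by omega, List.take_add_one]
      have h3 : (L.drop s)[i + 1 - s]? = some L[i + 1] := by
        rw [List.getElem?_drop,
          List.getElem?_eq_getElem (by omega : s + (i + 1 - s) < L.length)]
        congr 1
        congr 1
        omega
      rw [h3]
      rfl
    rw [hext, show ((i : Int) + 1 + 1) = (((i + 1 : Nat)) : Int) + 1 from by push_cast; ring,
      show ((i : Int) + 1 + ((m + 1 : Nat) : Int)) = (((i + 1 : Nat)) : Int) + 1 + (m : Int)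
        from by push_cast; ring]
    rw [ih s (i + 1) (by omega) (by omega)]
    congr 1
    omega

theorem seg_slice (L : List Char) (a b : Int) (h0 : 0 ≤ a) (hab : a < b)
    (hb : b ≤ (L.length : Int)) :
    (PySem.List.pyRange (a + 1) b 1).foldl
      (fun acc k => acc ++ [PySem.List.pyGetD L k ' ']) [PySem.List.pyGetD L a ' ']
    = PySem.List.slice L (some a) (some b) := by
  obtain ⟨s, rfl⟩ : ∃ s : Nat, a = (s : Int) := ⟨a.toNat, by omega⟩
  obtain ⟨m, rfl⟩ : ∃ m : Nat, b = (s : Int) + 1 + (m : Int) := ⟨(b - s - 1).toNat, by omega⟩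
  have hs : s < L.length := by omega
  have hsm : s + m < L.length := by omega
  have hinit : [PySem.List.pyGetD L (s : Int) ' '] = (L.drop s).take (s + 1 - s) := by
    rw [PySem.List.pyGetD_natCast, List.drop_eq_getElem_cons hs,
      show s + 1 - s = 1 from by omega, List.take_succ_cons, List.take_zero]
    simp [List.getD_eq_getElem?_getD, List.getElem?_eq_getElem hs]
  rw [hinit, seg_aux L m s s (le_refl _) hsm,
    show ((s : Int) + 1 + (m : Int)) = ((s + m + 1 : Nat) : Int) from by push_cast; ring,
    PySem.List.slice_natCast]

theorem split_en_alt_eq (e z : String) (hp : z.toList.length < e.toList.length) :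
    split_en_alt e z = (pairsFrom 0 (cutsFrom z 0)).map
      (fun p => String.ofList (PySem.List.slice e.toList (some p.1) (some p.2))) := by
  have hn0 : (0 : Int) ≤ PySem.Str.len z := by rw [PySem.Str.len_eq]; omega
  have hne : PySem.Str.len z + 1 ≤ (e.toList.length : Int) := by rw [PySem.Str.len_eq]; omega
  have hcuts : cutsFrom z 0
      = ((PySem.List.pyRange 0 (PySem.Str.len z) 1).filter
          (fun j => PySem.List.pyGetD z.toList j ' ' = '1')).map (fun b => b + 1)
        ++ [PySem.Str.len z + 1] := by
    unfold cutsFrom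
    rw [filterMap_if_eq_map_filter]
  have hFmem : ∀ x ∈ (PySem.List.pyRange 0 (PySem.Str.len z) 1).filter
      (fun j => PySem.List.pyGetD z.toList j ' ' = '1'), 0 ≤ x ∧ x < PySem.Str.len z := by
    intro x hx
    have := (List.mem_filter.1 hx).1
    exact (PySem.List.mem_pyRange_one).1 this
  have hFpw : ((PySem.List.pyRange 0 (PySem.Str.len z) 1).filter
      (fun j => PySem.List.pyGetD z.toList j ' ' = '1')).Pairwise (· < ·) :=
    List.Pairwise.filter _ (PySem.List.pairwise_lt_pyRange_one 0 (PySem.Str.len z))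
  have hpw : ((0 : Int) :: cutsFrom z 0).Pairwise (· < ·) := by
    rw [hcuts]
    refine List.pairwise_cons.2 ⟨?_, List.pairwise_append.2 ⟨?_, by simp, ?_⟩⟩
    · intro x hx
      rcases List.mem_append.1 hx with hx | hx
      · obtain ⟨b, hb, rfl⟩ := List.mem_map.1 hx
        have := (hFmem b hb).1
        omega
      · rw [List.mem_singleton] at hx
        subst hx
        omega
    · exact List.pairwise_map.2 (hFpw.imp (by intro a b h; omega))
    · intro a ha b hb
      obtain ⟨b0, hb0, rfl⟩ := List.mem_map.1 ha
      have := (hFmem b0 hb0).2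
      rw [List.mem_singleton] at hb
      subst hb
      omega
  have hM : ∀ x ∈ cutsFrom z 0, x ≤ PySem.Str.len z + 1 := by
    rw [hcuts]
    intro x hx
    rcases List.mem_append.1 hx with hx | hx
    · obtain ⟨b, hb, rfl⟩ := List.mem_map.1 hx
      have := (hFmem b hb).2
      omega
    · rw [List.mem_singleton] at hx
      subst hx
      omega
  have hB : split_en_alt e z
      = (((0 : Int) :: ((PySem.List.pyRange 0 (PySem.Str.len z) 1).filter
            (fun j => PySem.List.pyGetD z.toList j ' ' = '1')).map (fun b => b + 1)).zip
          (((PySem.List.pyRange 0 (PySem.Str.len z) 1).filter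
            (fun j => PySem.List.pyGetD z.toList j ' ' = '1')) ++ [PySem.Str.len z])).map
        (fun p => String.ofList ((PySem.List.pyRange (p.1 + 1) (p.2 + 1) 1).foldl
          (fun acc k => acc ++ [PySem.List.pyGetD e.toList k ' '])
          [PySem.List.pyGetD e.toList p.1 ' '])) := rfl
  rw [hB, pairs_shift, ← hcuts, List.map_map]
  refine List.map_congr_left ?_
  intro p hpmem
  obtain ⟨h1, h2, h3⟩ := pairs_bound (cutsFrom z 0) 0 (PySem.Str.len z + 1) hpw hM p hpmem
  have hb' : p.2 ≤ (e.toList.length : Int) := by omega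
  simp only [Function.comp]
  rw [show p.2 - 1 + 1 = p.2 from by ring]
  rw [seg_slice e.toList p.1 p.2 h1 h2 hb']

theorem split_en_eq (e z : String) (hp : z.toList.length < e.toList.length) :
    split_en e z = split_en_alt e z := by
  have h0 : 0 < e.toList.length := by omega
  have hd0 : e.toList = e.toList[0] :: e.toList.drop 1 := by
    simpa using List.drop_eq_getElem_cons h0
  have hcur : [PySem.List.pyGetD e.toList 0 ' '] = (e.toList.drop 0).take (0 + 1 - 0) := by
    rw [PySem.List.pyGetD_zero, List.drop_zero]
    conv_rhs => rw [hd0]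
    simp [List.getD_eq_getElem?_getD, List.getElem?_eq_getElem h0]
  have hmain := main_invariant e z hp z.toList.length 0 0 [] (by omega) (le_refl 0)
  simp only [Nat.cast_zero] at hmain
  rw [← hcur] at hmain
  have hA : split_en e z = (finishA ((PySem.List.pyRange 0 (PySem.Str.len z) 1).foldl
      (stepA e z) ([], [PySem.List.pyGetD e.toList 0 ' ']))).map String.ofList := rfl
  rw [hA, hmain, split_en_alt_eq e z hp]
  simp [List.map_map]

-- ===== VERDICT (by name: the statement is the Claim_ definition above) =====
theorem split_en_spec : Claim_equal_split_en := by
  intro e z _ hpre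
  unfold Spec_split_en
  exact split_en_eq e z hpre
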